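-- pv_equiv track=rewrite | github.com/javianng/thecode_CS1010X | Others/Extra Practice on Recursion and Iteration.py | star_wars_iteration
-- ===== SOURCE A (Python) =====
-- def star_wars_iteration(num_enemy_ships):
--     """Releases just enough pulses to take down enemy ships"""
--     result = ""
--     if num_enemy_ships == 0:
--         return result
--     else:
--         for counter in range(num_enemy_ships):
--             if counter%2 == 1: # if odd
--                 result += "*--"
--             elif counter%2 == 0: # if even
--                 result += "*-"
--         return result
-- ===== SOURCE B (Python) =====
-- def star_wars_iteration(num_enemy_ships):
--     """Releases just enough pulses to take down enemy ships"""
--     if num_enemy_ships <= 0: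
--         return ""
--     return "*-*--" * (num_enemy_ships // 2) + ("*-" if num_enemy_ships % 2 else "")
-- ===== Notes on version B (the rewrite author's own statement) =====
-- stated objective: faster
-- what changed: Replaces the per-index loop with a closed-form construction: each consecutive even/odd index pair contributes the fixed block '*-*--', so the result is that block repeated half-the-count times plus '*-' for an odd remainder, built by string repetition.
import Mathlib
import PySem

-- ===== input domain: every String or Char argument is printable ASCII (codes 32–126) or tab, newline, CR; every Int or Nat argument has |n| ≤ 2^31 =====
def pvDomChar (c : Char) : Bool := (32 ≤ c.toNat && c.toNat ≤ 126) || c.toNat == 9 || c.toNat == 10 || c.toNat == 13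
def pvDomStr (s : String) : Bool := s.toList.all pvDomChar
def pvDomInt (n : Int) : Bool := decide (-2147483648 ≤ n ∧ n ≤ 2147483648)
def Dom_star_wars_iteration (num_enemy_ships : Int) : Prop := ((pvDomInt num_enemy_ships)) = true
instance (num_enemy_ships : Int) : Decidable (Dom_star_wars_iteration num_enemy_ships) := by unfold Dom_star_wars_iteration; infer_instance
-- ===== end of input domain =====

-- B replaces the per-index loop by a closed-form construction: '*-*--' * (n//2) + ('*-' if n%2 else ''); objective: simpler.

-- ===== PORT A =====
def star_wars_iteration (num_enemy_ships : Int) : String :=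
  let result := ""
  if num_enemy_ships == 0 then result
  else
    (PySem.List.pyRange 0 num_enemy_ships 1).foldl (fun result counter =>
      if PySem.Int.mod counter 2 == 1 then result ++ "*--"
      else if PySem.Int.mod counter 2 == 0 then result ++ "*-"
      else result) result

-- ===== PORT B =====
def star_wars_iteration_alt (num_enemy_ships : Int) : String :=
  if num_enemy_ships ≤ 0 then ""
  else String.join (List.replicate (PySem.Int.floordiv num_enemy_ships 2).toNat "*-*--")
       ++ (if PySem.Int.mod num_enemy_ships 2 ≠ 0 then "*-" else "")

-- ===== PRECONDITION & SPEC =====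
def Spec_star_wars_iteration (num_enemy_ships : Int) (out : String) : Prop := out = star_wars_iteration_alt num_enemy_ships
instance (num_enemy_ships : Int) (out : String) : Decidable (Spec_star_wars_iteration num_enemy_ships out) := by unfold Spec_star_wars_iteration; infer_instance

-- ===== CLAIM (what is proved, stated in full; the proofs are below) =====
def Claim_equal_star_wars_iteration : Prop := ∀ (num_enemy_ships : Int), Dom_star_wars_iteration num_enemy_ships → Spec_star_wars_iteration num_enemy_ships (star_wars_iteration num_enemy_ships)

-- ===== LEMMAS AND PROOFS =====

-- A's loop body, named for the lemmas
def pvStep (result : String) (counter : Int) : String :=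
  if PySem.Int.mod counter 2 == 1 then result ++ "*--"
  else if PySem.Int.mod counter 2 == 0 then result ++ "*-"
  else result

lemma pvStep_even (r : String) (c : Int) (h : c % 2 = 0) : pvStep r c = r ++ "*-" := by
  simp [pvStep, h]

lemma pvStep_odd (r : String) (c : Int) (h : c % 2 = 1) : pvStep r c = r ++ "*--" := by
  simp [pvStep, h]

lemma pvFold_even (k : Nat) :
    (PySem.List.pyRange 0 (2 * (k : Int)) 1).foldl pvStep "" =
      String.join (List.replicate k "*-*--") := by
  induction k with
  | zero => simp [PySem.List.pyRange_one_eq_nil, String.join]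
  | succ k ih =>
      have e1 : (2 * (((k : Nat) + 1 : Nat) : Int)) = (2 * (k : Int) + 1) + 1 := by
        push_cast; ring
      rw [e1, PySem.List.pyRange_one_succ_right (by omega),
          PySem.List.pyRange_one_succ_right (by omega),
          List.foldl_append, List.foldl_append, ih]
      show pvStep (pvStep (String.join (List.replicate k "*-*--")) (2 * (k : Int)))
            (2 * (k : Int) + 1) = _
      rw [pvStep_even _ (2 * (k : Int)) (by omega),
          pvStep_odd _ (2 * (k : Int) + 1) (by omega)]
      rw [List.replicate_succ', String.join, String.join, List.foldl_append]
      simp [String.append_assoc]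

lemma pvFold_odd (k : Nat) :
    (PySem.List.pyRange 0 (2 * (k : Int) + 1) 1).foldl pvStep "" =
      String.join (List.replicate k "*-*--") ++ "*-" := by
  rw [PySem.List.pyRange_one_succ_right (by positivity), List.foldl_append, pvFold_even k]
  show pvStep _ (2 * (k : Int)) = _
  rw [pvStep_even _ (2 * (k : Int)) (by omega)]

-- ===== VERDICT (by name: the statement is the Claim_ definition above) =====
theorem star_wars_iteration_spec : Claim_equal_star_wars_iteration := by
  intro n _
  unfold Spec_star_wars_iteration star_wars_iteration star_wars_iteration_alt
  show (if n == 0 then "" else (PySem.List.pyRange 0 n 1).foldl pvStep "") = _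
  by_cases hn : n ≤ 0
  · rw [if_pos hn]
    rcases eq_or_lt_of_le hn with h | h
    · simp [h]
    · simp [Int.ne_of_lt h, PySem.List.pyRange_one_eq_nil (le_of_lt h)]
  · replace hn : 0 < n := by omega
    rw [if_neg (by simp; omega), if_neg (by omega)]
    rcases Int.emod_two_eq n with h2 | h2
    · -- n even
      obtain ⟨k, hk⟩ : ∃ k : Nat, n = 2 * (k : Int) := ⟨(n / 2).toNat, by omega⟩
      subst hk
      rw [pvFold_even k]
      have hf : PySem.Int.floordiv (2 * (k : Int)) 2 = (k : Int) := by
        rw [PySem.Int.floordiv_eq_ediv_of_pos (by norm_num : (0:Int) < 2)]; omega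
      have hm : PySem.Int.mod (2 * (k : Int)) 2 = 0 := by
        rw [PySem.Int.mod_eq_emod_of_pos (by norm_num : (0:Int) < 2)]; omega
      rw [hf, hm]
      simp
    · -- n odd
      obtain ⟨k, hk⟩ : ∃ k : Nat, n = 2 * (k : Int) + 1 := ⟨(n / 2).toNat, by omega⟩
      subst hk
      rw [pvFold_odd k]
      have hf : PySem.Int.floordiv (2 * (k : Int) + 1) 2 = (k : Int) := by
        rw [PySem.Int.floordiv_eq_ediv_of_pos (by norm_num : (0:Int) < 2)]; omega
      have hm : PySem.Int.mod (2 * (k : Int) + 1) 2 = 1 := by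
        rw [PySem.Int.mod_eq_emod_of_pos (by norm_num : (0:Int) < 2)]; omega
      rw [hf, hm]
      simp
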